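-- pv_equiv track=rewrite | github.com/2024-2-fundamentos-de-analitica/2024-2-LAB-01-python-basico-JDuqueg | homework/pregunta_11.py | dict_keys
-- ===== SOURCE A (Python) =====
-- def dict_keys(sequence):
--     result = {}
--     for line in sequence:
--         for key in line[2]:
--             if key == ',':
--                 continue
--             if key not in result.keys():
--                 result[key] = 0
--             result[key] += int(line[0])
--     return dict(sorted(result.items()))
-- ===== SOURCE B (Python) =====
-- def dict_keys(sequence):
--     chars = set()
--     for line in sequence:
--         chars.update(c for c in line[2] if c != ',')
--     totals = {}
--     for c in sorted(chars):
--         totals[c] = sum(int(line[0]) * cnt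
--                         for line in sequence if (cnt := line[2].count(c)) > 0)
--     return totals
-- ===== Notes on version B (the rewrite author's own statement) =====
-- stated objective: alternative
-- what changed: A increments a dict entry by int(line[0]) once per character occurrence inside a nested per-char loop; B first collects the set of distinct non-comma characters in one pass, then for each sorted character computes its total in one aggregate pass as sum of int(line[0]) * line[2].count(c) over the lines containing it, building the result directly in sorted key order.
import Mathlib
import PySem

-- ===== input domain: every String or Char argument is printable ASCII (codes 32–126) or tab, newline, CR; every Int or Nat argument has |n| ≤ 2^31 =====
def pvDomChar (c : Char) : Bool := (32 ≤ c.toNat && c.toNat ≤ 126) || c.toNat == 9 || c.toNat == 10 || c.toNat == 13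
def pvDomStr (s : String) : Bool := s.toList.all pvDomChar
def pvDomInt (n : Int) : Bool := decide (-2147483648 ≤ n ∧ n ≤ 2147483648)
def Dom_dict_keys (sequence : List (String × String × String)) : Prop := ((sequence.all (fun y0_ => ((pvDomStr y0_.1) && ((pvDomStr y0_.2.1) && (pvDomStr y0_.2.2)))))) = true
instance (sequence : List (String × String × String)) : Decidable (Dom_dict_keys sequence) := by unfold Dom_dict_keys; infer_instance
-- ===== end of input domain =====

-- B replaces A's per-occurrence dict increments by a distinct-character pass followed by
-- one aggregate total (weight * count) per sorted character (objective: alternative decomposition).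

-- ===== PORT A =====
-- int(line[0]) raising ValueError is `PySem.Int.ofStr? = none`; those inputs are excluded by
-- Pre_dict_keys below, so the `.getD 0` totalisation is never observed on admitted inputs.
def dict_keys (sequence : List (String × String × String)) : List (String × Int) :=
  let result : PySem.Dict String Int :=
    sequence.foldl (fun result line =>
      line.2.2.toList.foldl (fun result key =>
        if key = ',' then result
        else
          let result :=
            if result.contains (String.singleton key) then result
            else result.insert (String.singleton key) (0 : Int)
          result.insert (String.singleton key)
            (result.getD (String.singleton key) 0 + (PySem.Int.ofStr? line.1).getD 0))
        result)
      PySem.Dict.empty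
  PySem.List.sorted2 result.items (fun p => p.1) (fun p => p.2)

-- ===== PORT B =====
def dict_keys_alt (sequence : List (String × String × String)) : List (String × Int) :=
  let chars : PySem.Set Char :=
    sequence.foldl
      (fun s line => PySem.Set.update s (line.2.2.toList.filter (fun c => decide (c ≠ ','))))
      PySem.Set.empty
  let totals : PySem.Dict String Int :=
    (PySem.List.sorted chars (fun c => c)).foldl
      (fun d c =>
        d.insert (String.singleton c)
          (sequence.foldl (fun acc line =>
            let cnt : Int := (PySem.Str.count line.2.2 (String.singleton c) : Int)
            if cnt > 0 then acc + (PySem.Int.ofStr? line.1).getD 0 * cnt else acc) 0))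
      PySem.Dict.empty
  totals.items

-- ===== PRECONDITION & SPEC =====
-- Pre_ excludes exactly the inputs on which Python A raises ValueError: a line whose third
-- component contains a non-comma character but whose first component does not parse as an int.
def Pre_dict_keys (sequence : List (String × String × String)) : Prop :=
  ∀ line ∈ sequence,
    (line.2.2.toList.any (fun c => decide (c ≠ ','))) = true →
      (PySem.Int.ofStr? line.1).isSome = true
instance (sequence : List (String × String × String)) : Decidable (Pre_dict_keys sequence) := by
  unfold Pre_dict_keys; infer_instance

def pvWitness_dict_keys : (List (String × String × String)) :=
  [("3", "x", "ab,a"), ("-2", "y", "b")]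

def Spec_dict_keys (sequence : List (String × String × String)) (out : List (String × Int)) : Prop :=
  out = dict_keys_alt sequence
instance (sequence : List (String × String × String)) (out : List (String × Int)) : Decidable (Spec_dict_keys sequence out) := by
  unfold Spec_dict_keys; infer_instance

-- ===== CLAIM (what is proved, stated in full; the proofs are below) =====
def Claim_equal_dict_keys : Prop := ∀ (sequence : List (String × String × String)), Dom_dict_keys sequence → Pre_dict_keys sequence → Spec_dict_keys sequence (dict_keys sequence)

-- ===== LEMMAS AND PROOFS =====

-- weight of a line (0 stands for an excluded unparsable weight; never observed inside Pre_)
def pvWt (line : String × String × String) : Int := (PySem.Int.ofStr? line.1).getD 0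

-- the non-comma characters of a line, in order
def pvLineChars (line : String × String × String) : List Char :=
  line.2.2.toList.filter (fun c => decide (c ≠ ','))

-- all weighted non-comma characters of the input, in traversal order
def pvWs (sequence : List (String × String × String)) : List (Char × Int) :=
  sequence.flatMap (fun line => (pvLineChars line).map (fun c => (c, pvWt line)))

-- A's loop body (after the two-step insert) is a single Dict.modify
theorem pvStepA_eq (d : PySem.Dict String Int) (s : String) (v : Int) :
    (let d' := if d.contains s then d else d.insert s (0 : Int)
     d'.insert s (d'.getD s 0 + v)) = d.modify s 0 (· + v) := by
  by_cases h : d.contains s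
  · simp [h, PySem.Dict.modify]
  · have h0 : d.getD s 0 = 0 := PySem.Dict.getD_of_not_contains d 0 (by simpa using h)
    simp [h, PySem.Dict.modify, PySem.Dict.getD_insert_self,
      PySem.Dict.insert_insert_self, h0]

-- skipping the comma inside the loop = folding over the filtered characters
theorem pvFoldl_skip_comma {α : Type} (f : α → Char → α) (cs : List Char) (d : α) :
    cs.foldl (fun d k => if k = ',' then d else f d k) d
      = (cs.filter (fun c => decide (c ≠ ','))).foldl f d := by
  induction cs generalizing d with
  | nil => rfl
  | cons c t ih =>
    by_cases h : c = ',' <;> simp [h, ih]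

-- the nested A loop is one fold over the weighted character list pvWs
theorem pvDictA_eq (sequence : List (String × String × String)) (d0 : PySem.Dict String Int) :
    sequence.foldl (fun d line =>
        (pvLineChars line).foldl (fun d k => d.modify (String.singleton k) 0 (· + pvWt line)) d) d0
      = (pvWs sequence).foldl (fun d p => d.modify (String.singleton p.1) 0 (· + p.2)) d0 := by
  induction sequence generalizing d0 with
  | nil => rfl
  | cons l t ih => simp [pvWs, List.foldl_append, List.foldl_map, ih, List.flatMap_cons]

-- lookup in the modify-fold: old value plus the sum of matching weights
theorem pvGetD_foldl_modify (l : List (Char × Int)) (d : PySem.Dict String Int) (s : String) :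
    ((l.foldl (fun d p => d.modify (String.singleton p.1) 0 (· + p.2)) d).getD s 0)
      = d.getD s 0 + ((l.filter (fun p => decide (String.singleton p.1 = s))).map (·.2)).sum := by
  induction l generalizing d with
  | nil => simp
  | cons p t ih =>
    by_cases h : String.singleton p.1 = s
    · simp [ih, h]; ring
    · have h' : ¬ s = String.singleton p.1 := fun hh => h hh.symm
      simp [ih, PySem.Dict.getD_modify, h, h']

theorem pvSingleton_lt {c d : Char} (h : c < d) : String.singleton c < String.singleton d := by
  simp [String.singleton, List.cons_lt_cons_iff]
  exact h

theorem pvSingleton_inj : Function.Injective String.singleton := by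
  intro a b h
  simpa [String.singleton] using h

-- insertBy only looks at `before` on the inserted element versus list members
theorem pvInsertBy_congr {α : Type} (b b' : α → α → Bool) (x : α) (ys : List α)
    (h : ∀ y ∈ ys, b x y = b' x y) :
    PySem.List.insertBy b x ys = PySem.List.insertBy b' x ys := by
  induction ys with
  | nil => rfl
  | cons y t ih =>
    have hy := h y (by simp)
    simp only [PySem.List.insertBy, hy]
    by_cases hb : b' x y
    · simp [hb]
    · simp [hb]
      exact ih (fun z hz => h z (by simp [hz]))

-- an insertion-sort fold is unchanged when the comparison agrees on all pairs of S
theorem pvFoldl_insertBy_congr {α : Type} (S : List α) (B B' : α → α → Bool)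
    (h : ∀ a ∈ S, ∀ b ∈ S, B a b = B' a b) :
    ∀ (xs acc : List α), (∀ x ∈ xs, x ∈ S) → (∀ y ∈ acc, y ∈ S) →
      xs.foldl (fun acc x => PySem.List.insertBy B x acc) acc
        = xs.foldl (fun acc x => PySem.List.insertBy B' x acc) acc := by
  intro xs
  induction xs with
  | nil => intro acc _ _; rfl
  | cons x t ih =>
    intro acc hxs hacc
    have hx : x ∈ S := hxs x (by simp)
    have hcong : PySem.List.insertBy B x acc = PySem.List.insertBy B' x acc :=
      pvInsertBy_congr _ _ _ _ (fun y hy => h x hx y (hacc y hy))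
    simp only [List.foldl_cons, hcong]
    exact ih _ (fun z hz => hxs z (by simp [hz]))
      (fun y hy => by
        rcases (PySem.List.mem_insertBy B' x y acc).1 hy with rfl | hy'
        · exact hx
        · exact hacc y hy')

-- sorted2 over a list whose first components are pairwise distinct is sorted by the first component
theorem pvSorted2_eq_sorted_fst (xs : List (String × Int))
    (hnd : (xs.map (·.1)).Nodup) :
    PySem.List.sorted2 xs (fun p => p.1) (fun p => p.2)
      = PySem.List.sorted xs (fun p => p.1) := by
  have hinj : ∀ a ∈ xs, ∀ b ∈ xs, a.1 = b.1 → a = b := by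
    intro a ha b hb hab
    exact List.inj_on_of_nodup_map hnd ha hb hab
  have h : ∀ a ∈ xs, ∀ b ∈ xs,
      (fun a b => decide (a.1 < b.1) || !decide (b.1 < a.1) && decide (a.2 < b.2)) a b
        = (fun a b => decide (a.1 < b.1)) a b := by
    intro a ha b hb
    by_cases h1 : a.1 < b.1
    · simp [h1]
    · by_cases h2 : b.1 < a.1
      · simp [h2]
      · have : a.1 = b.1 := le_antisymm (not_lt.1 h2) (not_lt.1 h1)
        have := hinj a ha b hb this
        subst this
        simp
  calc PySem.List.sorted2 xs (fun p => p.1) (fun p => p.2)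
      = xs.foldl (fun acc x => PySem.List.insertBy
          (fun a b => decide (a.1 < b.1) || !decide (b.1 < a.1) && decide (a.2 < b.2)) x acc) [] := by
        simp [PySem.List.sorted2]
    _ = xs.foldl (fun acc x => PySem.List.insertBy (fun a b => decide (a.1 < b.1)) x acc) [] :=
        pvFoldl_insertBy_congr xs _ _ h xs [] (fun x hx => hx) (by simp)
    _ = PySem.List.sorted xs (fun p => p.1) := (PySem.List.sorted_eq_foldl_insertBy xs _).symm

-- B's set-building pass collects exactly the distinct non-comma characters, first occurrences first
theorem pvChars_eq (sequence : List (String × String × String)) :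
    sequence.foldl
        (fun s line => PySem.Set.update s (pvLineChars line)) PySem.Set.empty
      = PySem.Set.ofList (sequence.flatMap pvLineChars) := by
  suffices h : ∀ (s : PySem.Set Char),
      sequence.foldl (fun s line => PySem.Set.update s (pvLineChars line)) s
        = (sequence.flatMap pvLineChars).foldl PySem.Set.add s by
    simpa [PySem.Set.ofList, PySem.Set.empty] using h PySem.Set.empty
  induction sequence with
  | nil => intro s; rfl
  | cons l t ih =>
    intro s
    simp only [List.foldl_cons, List.flatMap_cons, List.foldl_append]
    exact ih _

-- ofList commutes with mapping an injective function
theorem pvOfList_map (f : Char → String) (hf : Function.Injective f) (xs : List Char) :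
    PySem.Set.ofList (xs.map f) = (PySem.Set.ofList xs).map f := by
  suffices h : ∀ (s : PySem.Set Char),
      (xs.map f).foldl PySem.Set.add (s.map f) = (xs.foldl PySem.Set.add s).map f by
    simpa [PySem.Set.ofList, PySem.Set.empty] using h []
  induction xs with
  | nil => intro s; rfl
  | cons x t ih =>
    intro s
    have hmm : (f x ∈ List.map f s) ↔ x ∈ s := by
      constructor
      · intro h; rcases List.mem_map.1 h with ⟨z, hz, hzx⟩; rwa [← hf hzx]
      · exact List.mem_map_of_mem
    have hadd : PySem.Set.add (List.map f s) (f x) = List.map f (PySem.Set.add s x) := by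
      by_cases hm : x ∈ s
      · have e1 : PySem.Set.contains (List.map f s) (f x) = true :=
          (PySem.Set.contains_iff _ _).2 (hmm.2 hm)
        have e2 : PySem.Set.contains s x = true := (PySem.Set.contains_iff _ _).2 hm
        simp only [PySem.Set.add]
        rw [e1, e2]
        simp
      · have e1 : PySem.Set.contains (List.map f s) (f x) = false := by
          rw [Bool.eq_false_iff]; intro hh; exact hm (hmm.1 ((PySem.Set.contains_iff _ _).1 hh))
        have e2 : PySem.Set.contains s x = false := by
          rw [Bool.eq_false_iff]; intro hh; exact hm ((PySem.Set.contains_iff _ _).1 hh)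
        simp only [PySem.Set.add]
        rw [e1, e2]
        simp
    rw [List.map_cons, List.foldl_cons, List.foldl_cons, hadd]
    exact ih _

-- PySem.Chars.count with a single-character needle is List.count
theorem pvCountGo (c : Char) : ∀ (fuel : Nat) (l : List Char) (acc : Nat), l.length ≤ fuel →
    PySem.Chars.count.go [c] fuel l acc = acc + l.count c := by
  intro fuel
  induction fuel with
  | zero =>
    intro l acc h
    have : l = [] := List.eq_nil_of_length_eq_zero (Nat.le_zero.1 h)
    subst this
    simp [PySem.Chars.count.go]
  | succ n ih =>
    intro l acc h
    cases l with
    | nil => simp [PySem.Chars.count.go]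
    | cons x t =>
      by_cases hx : c = x
      · subst hx
        rw [PySem.Chars.count.go]
        simp only [List.isPrefixOf, BEq.rfl, Bool.and_true, if_true]
        rw [ih _ _ (by simpa using Nat.le_of_succ_le_succ h)]
        simp
        omega
      · rw [PySem.Chars.count.go]
        have : ([c].isPrefixOf (x :: t)) = false := by
          simp [List.isPrefixOf]
          exact fun hh => hx (by simpa using hh)
        rw [this]
        simp only [Bool.false_eq_true, if_false]
        rw [ih _ _ (by simpa using Nat.le_of_succ_le_succ h)]
        have hx' : ¬ x = c := fun hh => hx hh.symm
        simp [hx']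

theorem pvStrCount (s : String) (c : Char) :
    PySem.Str.count s (String.singleton c) = s.toList.count c := by
  rw [PySem.Str.count_eq]
  have : (String.singleton c).toList = [c] := by simp [String.singleton]
  rw [this, PySem.Chars.count]
  simpa using pvCountGo c s.length s.toList 0 (by simp)

theorem pvIfCollapse (acc w : Int) (n : Nat) :
    (if ((n : Int) > 0) then acc + w * (n : Int) else acc) = acc + w * (n : Int) := by
  by_cases h : ((n : Int) > 0)
  · rw [if_pos h]
  · have h0 : (n : Int) = 0 := by omega
    rw [if_neg h, h0, mul_zero, add_zero]

-- one line's share of the matching-weight sum is weight * occurrence count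
theorem pvLineSum (line : String × String × String) (c : Char) (hc : c ≠ ',') :
    ((((pvLineChars line).map (fun c' => (c', pvWt line))).filter
        (fun p => decide (String.singleton p.1 = String.singleton c))).map (·.2)).sum
      = pvWt line * (line.2.2.toList.count c : Int) := by
  have hpred : ∀ c' : Char, (decide (String.singleton c' = String.singleton c)) = (c' = c : Bool) := by
    intro c'
    by_cases h : c' = c
    · simp [h]
    · have h' : ¬ String.singleton c' = String.singleton c := by
        intro hh
        exact h (by simpa [String.singleton] using congrArg String.toList hh)
      simp [h, h']
  rw [List.filter_map]
  have heq : ((fun p => decide (String.singleton (Prod.fst p) = String.singleton c)) ∘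
      (fun c' => (c', pvWt line))) = (fun c' => (c' = c : Bool)) := by
    funext c'
    simp [hpred c']
  rw [heq, List.filter_eq, List.map_map, List.map_replicate]
  have hcount : (pvLineChars line).count c = line.2.2.toList.count c := by
    simp [pvLineChars, List.count_filter, hc]
  simp [hcount, List.sum_replicate, mul_comm]

-- the per-character aggregate pass of B equals the matching-weight sum over pvWs
theorem pvTotal_eq (sequence : List (String × String × String)) (c : Char) (hc : c ≠ ',') :
    sequence.foldl (fun acc line =>
        let cnt : Int := (PySem.Str.count line.2.2 (String.singleton c) : Int)
        if cnt > 0 then acc + (PySem.Int.ofStr? line.1).getD 0 * cnt else acc) 0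
      = (((pvWs sequence).filter (fun p => decide (String.singleton p.1 = String.singleton c))).map (·.2)).sum := by
  suffices h : ∀ acc : Int, sequence.foldl (fun acc line =>
        let cnt : Int := (PySem.Str.count line.2.2 (String.singleton c) : Int)
        if cnt > 0 then acc + (PySem.Int.ofStr? line.1).getD 0 * cnt else acc) acc
      = acc + (((pvWs sequence).filter
          (fun p => decide (String.singleton p.1 = String.singleton c))).map (·.2)).sum by
    simpa using h 0
  induction sequence with
  | nil => intro acc; simp [pvWs]
  | cons l t ih =>
    intro acc
    rw [List.foldl_cons]
    show List.foldl _ (if (((PySem.Str.count l.2.2 (String.singleton c) : Nat) : Int) > 0)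
        then acc + (PySem.Int.ofStr? l.1).getD 0 * ((PySem.Str.count l.2.2 (String.singleton c) : Nat) : Int)
        else acc) t = _
    rw [pvIfCollapse, ih]
    rw [pvStrCount]
    have hwt : pvWt l = (PySem.Int.ofStr? l.1).getD 0 := rfl
    rw [← hwt, ← pvLineSum l c hc]
    simp [pvWs, List.flatMap_cons, List.filter_append, List.map_append, List.sum_append]
    ring

-- the dict A has built after its two nested loops
def pvD (sequence : List (String × String × String)) : PySem.Dict String Int :=
  (pvWs sequence).foldl (fun d p => d.modify (String.singleton p.1) 0 (· + p.2)) PySem.Dict.empty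

-- A's inner character loop is a fold of modify over the line's non-comma characters
theorem pvInnerA (line : String × String × String) (d : PySem.Dict String Int) :
    line.2.2.toList.foldl (fun result key =>
        if key = ',' then result
        else
          let result :=
            if result.contains (String.singleton key) then result
            else result.insert (String.singleton key) (0 : Int)
          result.insert (String.singleton key)
            (result.getD (String.singleton key) 0 + (PySem.Int.ofStr? line.1).getD 0)) d
      = (pvLineChars line).foldl
          (fun d k => d.modify (String.singleton k) 0 (· + pvWt line)) d := by
  rw [pvLineChars, ← pvFoldl_skip_comma]
  apply List.foldl_ext
  intro d k _
  by_cases h : k = ','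
  · simp [h]
  · simp only [h, if_false]
    exact pvStepA_eq d (String.singleton k) (pvWt line)

-- the two ports agree on every input
theorem pvMain (sequence : List (String × String × String)) :
    dict_keys sequence = dict_keys_alt sequence := by
  simp only [dict_keys, dict_keys_alt]
  -- A's doubly nested loop builds pvD
  have hA : sequence.foldl (fun result line =>
      line.2.2.toList.foldl (fun result key =>
        if key = ',' then result
        else
          let result :=
            if result.contains (String.singleton key) then result
            else result.insert (String.singleton key) (0 : Int)
          result.insert (String.singleton key)
            (result.getD (String.singleton key) 0 + (PySem.Int.ofStr? line.1).getD 0))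
        result) PySem.Dict.empty = pvD sequence := by
    rw [List.foldl_ext _ _ _ (fun d line _ => pvInnerA line d)]
    exact pvDictA_eq sequence PySem.Dict.empty
  rw [hA]
  -- B's first pass builds the distinct non-comma character set
  have hchars : sequence.foldl
      (fun s line => PySem.Set.update s (line.2.2.toList.filter (fun c => decide (c ≠ ','))))
      PySem.Set.empty = PySem.Set.ofList (sequence.flatMap pvLineChars) := pvChars_eq sequence
  rw [hchars]
  -- abbreviations
  have hK : ∀ c ∈ PySem.Set.ofList (sequence.flatMap pvLineChars), c ≠ ',' := by
    intro c hcm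
    have := (PySem.Set.mem_ofList _ _).1 hcm
    rcases List.mem_flatMap.1 this with ⟨line, _, hc⟩
    simpa [pvLineChars] using (List.mem_filter.1 hc).2
  -- A's dict: keys, nodup, lookups
  have hkeys : (pvD sequence).keys
      = (PySem.Set.ofList (sequence.flatMap pvLineChars)).map String.singleton := by
    rw [pvD, PySem.Dict.keys_foldl_modify_key (pvWs sequence) (fun p => String.singleton p.1) 0
        (fun _ p => (· + p.2)) PySem.Dict.empty, PySem.Dict.keys_empty, PySem.Set.update_nil_left,
      ← pvOfList_map String.singleton pvSingleton_inj]
    congr 1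
    simp [pvWs, List.map_flatMap, List.map_map, Function.comp_def]
  have hnodup : (pvD sequence).keys.Nodup := by
    rw [hkeys]
    exact (PySem.Set.nodup_ofList _).map pvSingleton_inj
  have hitems : (pvD sequence).items
      = (PySem.Set.ofList (sequence.flatMap pvLineChars)).map
          (fun c => (String.singleton c, (pvD sequence).getD (String.singleton c) 0)) := by
    rw [PySem.Dict.items_eq_map_keys _ hnodup 0, hkeys, List.map_map]
    rfl
  -- B's second pass: fresh distinct keys, appended in sorted order
  have hSKnodup : (PySem.List.sorted (PySem.Set.ofList (sequence.flatMap pvLineChars))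
      (fun c => c)).Nodup :=
    (PySem.List.sorted_perm _ _ _).symm.nodup (PySem.Set.nodup_ofList _)
  have hB := PySem.Dict.items_foldl_insert_fresh
      (PySem.List.sorted (PySem.Set.ofList (sequence.flatMap pvLineChars)) (fun c => c))
      (fun c => String.singleton c)
      (fun c => sequence.foldl (fun acc line =>
          let cnt : Int := (PySem.Str.count line.2.2 (String.singleton c) : Int)
          if cnt > 0 then acc + (PySem.Int.ofStr? line.1).getD 0 * cnt else acc) 0)
      PySem.Dict.empty
      (fun a _ => by simp)
      (hSKnodup.map pvSingleton_inj)
  rw [hB]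
  simp only [show (PySem.Dict.empty : PySem.Dict String Int).items = [] from rfl, List.nil_append]
  -- each total equals the stored dict value
  have hptw : ∀ c ∈ PySem.List.sorted (PySem.Set.ofList (sequence.flatMap pvLineChars))
      (fun c => c),
      ((fun c => (String.singleton c, sequence.foldl (fun acc line =>
          let cnt : Int := (PySem.Str.count line.2.2 (String.singleton c) : Int)
          if cnt > 0 then acc + (PySem.Int.ofStr? line.1).getD 0 * cnt else acc) 0)) c)
        = ((fun c => (String.singleton c, (pvD sequence).getD (String.singleton c) 0)) c) := by
    intro c hcm
    have hc : c ≠ ',' := hK c ((PySem.List.mem_sorted _ _ _ _).1 hcm)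
    have hval : (pvD sequence).getD (String.singleton c) 0
        = (((pvWs sequence).filter
            (fun p => decide (String.singleton p.1 = String.singleton c))).map (·.2)).sum := by
      rw [pvD, pvGetD_foldl_modify, PySem.Dict.getD_empty, zero_add]
    simp only [hval, pvTotal_eq sequence c hc]
  rw [List.map_congr_left hptw]
  -- now both sides are rearrangements of pvD's items, sorted strictly by key
  rw [pvSorted2_eq_sorted_fst _ hnodup]
  refine PySem.List.sorted_eq_of_perm_of_pairwise_lt _ _ _ ?_ ?_
  · rw [hitems]
    exact (PySem.List.sorted_perm _ _ _).map _
  · refine List.pairwise_map.2 ?_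
    exact (PySem.List.sorted_ofList_pairwise_lt _).imp (fun h => pvSingleton_lt h)

-- ===== VERDICT (by name: the statement is the Claim_ definition above) =====
theorem dict_keys_spec : Claim_equal_dict_keys := by
  intro sequence _ _
  exact pvMain sequence
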